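-- pv_equiv track=rewrite | github.com/Rakibul-haque-sami/Assignment-2 | Q2 C2.py | separate_and_convert
-- ===== SOURCE A (Python) =====
-- def separate_and_convert(s):
--     # Separate into number and letter substrings
--     number_string = ''.join([c for c in s if c.isdigit()])
--     letter_string = ''.join([c for c in s if c.isalpha()])
--
--     # Convert even numbers in the number substring to ASCII Code Decimal Values
--     even_numbers = [int(num) for num in number_string if int(num) % 2 == 0]
--     ascii_values_numbers = [ord(str(num)) for num in even_numbers]
--
--     # Convert upper-case letters in the letter substring to ASCII Code Decimal Values
--     upper_case_letters = [char for char in letter_string if char.isupper()]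
--     ascii_values_letters = [ord(char) for char in upper_case_letters]
--
--     return number_string, letter_string, ascii_values_numbers, ascii_values_letters
-- ===== SOURCE B (Python) =====
-- def separate_and_convert(s):
--     # One pass over s maintaining all four results together (A scans s repeatedly).
--     number_string = ''
--     letter_string = ''
--     ascii_values_numbers = []
--     ascii_values_letters = []
--     for c in s:
--         if c.isdigit():
--             number_string += c
--             if int(c) % 2 == 0:
--                 ascii_values_numbers.append(ord(c))
--         if c.isalpha():
--             letter_string += c
--             if c.isupper():
--                 ascii_values_letters.append(ord(c))
--     return number_string, letter_string, ascii_values_numbers, ascii_values_letters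
-- ===== Notes on version B (the rewrite author's own statement) =====
-- stated objective: simpler
-- what changed: Replaces A's five separate comprehension passes (plus the int->str->ord round trip on digits) with a single for-loop over s that maintains all four results at once, appending ord(c) directly.
import Mathlib
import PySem

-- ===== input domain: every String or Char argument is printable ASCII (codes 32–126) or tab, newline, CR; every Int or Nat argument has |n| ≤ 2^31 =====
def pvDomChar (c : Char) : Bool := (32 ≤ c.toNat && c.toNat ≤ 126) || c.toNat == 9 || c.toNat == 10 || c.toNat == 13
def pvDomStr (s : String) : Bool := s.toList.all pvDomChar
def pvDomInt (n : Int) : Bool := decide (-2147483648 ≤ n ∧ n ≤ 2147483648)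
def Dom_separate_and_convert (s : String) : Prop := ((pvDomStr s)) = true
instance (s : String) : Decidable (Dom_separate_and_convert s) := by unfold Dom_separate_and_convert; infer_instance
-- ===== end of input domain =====

-- B is a single loop over s maintaining all four results together, instead of A's five comprehension passes.

-- ===== PORT A =====
-- int(c) for a one-char string; never `none` here since PySem.Chars.isdigit admits only '0'..'9'
def sacToInt (c : Char) : Int := (PySem.Int.ofStr? (String.mk [c])).getD 0

def separate_and_convert (s : String) : String × String × List Int × List Int :=
  let number_string := s.toList.filter (fun c => PySem.Chars.isdigit c)
  let letter_string := s.toList.filter (fun c => PySem.Chars.isalpha c)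
  let even_numbers := (number_string.filter (fun c => PySem.Int.mod (sacToInt c) 2 = 0)).map sacToInt
  -- ord(str(num)); str(num) is a single character here (num ∈ 0..9)
  let ascii_values_numbers := even_numbers.map (fun n => (((PySem.Int.toStr n).toList.headD ' ').toNat : Int))
  let upper_case_letters := letter_string.filter (fun c => PySem.Chars.isupper c)
  let ascii_values_letters := upper_case_letters.map (fun c => (c.toNat : Int))
  (String.mk number_string, String.mk letter_string, ascii_values_numbers, ascii_values_letters)

-- ===== PORT B =====
def sacLoop : List Char → List Char → List Char → List Int → List Int → String × String × List Int × List Int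
  | [], ns, ls, an, al => (String.mk ns, String.mk ls, an, al)
  | c :: rest, ns, ls, an, al =>
    let p1 := if PySem.Chars.isdigit c then
        (ns ++ [c], if PySem.Int.mod (sacToInt c) 2 = 0 then an ++ [(c.toNat : Int)] else an)
      else (ns, an)
    let p2 := if PySem.Chars.isalpha c then
        (ls ++ [c], if PySem.Chars.isupper c then al ++ [(c.toNat : Int)] else al)
      else (ls, al)
    sacLoop rest p1.1 p2.1 p1.2 p2.2

def separate_and_convert_alt (s : String) : String × String × List Int × List Int :=
  sacLoop s.toList [] [] [] []

-- ===== PRECONDITION & SPEC =====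
def Spec_separate_and_convert (s : String) (out : String × String × List Int × List Int) : Prop := out = separate_and_convert_alt s
instance (s : String) (out : String × String × List Int × List Int) : Decidable (Spec_separate_and_convert s out) := by unfold Spec_separate_and_convert; infer_instance

-- ===== CLAIM (what is proved, stated in full; the proofs are below) =====
def Claim_equal_separate_and_convert : Prop := ∀ (s : String), Dom_separate_and_convert s → Spec_separate_and_convert s (separate_and_convert s)

-- ===== LEMMAS AND PROOFS =====

lemma sac_digit_enum (c : Char) (h : PySem.Chars.isdigit c = true) :
    c = '0' ∨ c = '1' ∨ c = '2' ∨ c = '3' ∨ c = '4' ∨ c = '5' ∨ c = '6' ∨ c = '7' ∨ c = '8' ∨ c = '9' := by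
  have h0 : ('0' ≤ c) ∧ (c ≤ '9') := by simpa [PySem.Chars.isdigit] using h
  have h1 : ('0').val.toNat ≤ c.val.toNat := UInt32.le_iff_toNat_le.mp (Char.le_def.mp h0.1)
  have h2 : c.val.toNat ≤ ('9').val.toNat := UInt32.le_iff_toNat_le.mp (Char.le_def.mp h0.2)
  have e0 : ('0').val.toNat = 48 := rfl
  have e9 : ('9').val.toNat = 57 := rfl
  have hv : c.val.toNat = 48 ∨ c.val.toNat = 49 ∨ c.val.toNat = 50 ∨ c.val.toNat = 51 ∨
      c.val.toNat = 52 ∨ c.val.toNat = 53 ∨ c.val.toNat = 54 ∨ c.val.toNat = 55 ∨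
      c.val.toNat = 56 ∨ c.val.toNat = 57 := by omega
  clear h h0 h1 h2 e0 e9
  rcases hv with h'|h'|h'|h'|h'|h'|h'|h'|h'|h' <;>
    [left; (right;left); (right;right;left); (right;right;right;left);
     (right;right;right;right;left); (right;right;right;right;right;left);
     (right;right;right;right;right;right;left);
     (right;right;right;right;right;right;right;left);
     (right;right;right;right;right;right;right;right;left);
     (right;right;right;right;right;right;right;right;right)] <;>
    · apply Char.ext; apply UInt32.toNat_inj.mp; simpa using h'

lemma sac_digit_not_alpha (c : Char) (h : PySem.Chars.isdigit c = true) :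
    PySem.Chars.isalpha c = false := by
  rcases sac_digit_enum c h with h'|h'|h'|h'|h'|h'|h'|h'|h'|h' <;> subst h' <;> decide

lemma sac_ord_str (c : Char) (h : PySem.Chars.isdigit c = true) :
    (((PySem.Int.toStr (sacToInt c)).toList.headD ' ').toNat : Int) = (c.toNat : Int) := by
  rcases sac_digit_enum c h with h'|h'|h'|h'|h'|h'|h'|h'|h'|h' <;> subst h' <;> decide

lemma sacLoop_spec (cs : List Char) (ns ls : List Char) (an al : List Int) :
    sacLoop cs ns ls an al =
      (String.mk (ns ++ cs.filter (fun c => PySem.Chars.isdigit c)),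
       String.mk (ls ++ cs.filter (fun c => PySem.Chars.isalpha c)),
       an ++ ((cs.filter (fun c => PySem.Chars.isdigit c)).filter
                (fun c => PySem.Int.mod (sacToInt c) 2 = 0)).map
              (fun c => (((PySem.Int.toStr (sacToInt c)).toList.headD ' ').toNat : Int)),
       al ++ ((cs.filter (fun c => PySem.Chars.isalpha c)).filter
                (fun c => PySem.Chars.isupper c)).map (fun c => (c.toNat : Int))) := by
  induction cs generalizing ns ls an al with
  | nil => simp [sacLoop]
  | cons c rest ih =>
    simp only [sacLoop, ih, List.filter_cons]
    by_cases hd : PySem.Chars.isdigit c = true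
    · have ha := sac_digit_not_alpha c hd
      by_cases he : PySem.Int.mod (sacToInt c) 2 = 0
      · simp only [hd, ha, he, decide_true, if_true, Bool.false_eq_true, if_false,
          List.filter_cons, List.map_cons, List.cons_append, List.append_assoc, List.nil_append,
          List.singleton_append, sac_ord_str c hd]
      · simp only [hd, ha, he, decide_false, if_true, Bool.false_eq_true, if_false,
          List.filter_cons, List.map_cons, List.append_assoc, List.nil_append]
        simp
    · by_cases ha : PySem.Chars.isalpha c = true
      · by_cases hu : PySem.Chars.isupper c = true
        · simp only [hd, ha, hu, decide_true, if_true, Bool.false_eq_true, if_false,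
            List.filter_cons, List.map_cons, List.append_assoc, List.nil_append, List.singleton_append]
        · simp only [hd, ha, hu, decide_false, if_true, Bool.false_eq_true, if_false,
            List.filter_cons, List.map_cons, List.append_assoc, List.nil_append, List.singleton_append]
      · simp only [Bool.not_eq_true] at hd ha
        simp only [hd, ha, Bool.false_eq_true, if_false]

-- ===== VERDICT (by name: the statement is the Claim_ definition above) =====
theorem separate_and_convert_spec : Claim_equal_separate_and_convert := by
  intro s _
  unfold Spec_separate_and_convert separate_and_convert separate_and_convert_alt
  rw [sacLoop_spec]
  simp [List.filter_map, List.map_map, Function.comp]
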